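-- pv_equiv track=rewrite | github.com/carden-code/algorithms | final_sleight_of_hand.py | sleight_of_hand
-- ===== SOURCE A (Python) =====
-- from typing import List, Tuple
--
-- PLAYERS = 2
--
-- def sleight_of_hand(character_list: List[str], number_clicks: int) -> int:
--     """
--     This function takes a list of characters and a number of clicks.
--         In the loop, we go over all the elements and if the element is not
--         a point and it is not in the deleted set, we add 1 to the dictionary.
--         If the number of elements exceeds the number of
--         clicks * on the number of players, then remove the element
--         from the dictionary and add it to the deleted set.
--         And return the length of the dictionary.
--     """
--     del_char = set()
--     counnt_dict = {x: 0 for x in set(character_list) if x != '.'}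
--     for s in character_list:
--         if s != '.' and s not in del_char:
--             counnt_dict[s] += 1
--             if counnt_dict[s] > number_clicks * PLAYERS:
--                 del_char.add(s)
--                 del counnt_dict[s]
--     return len(counnt_dict)
-- ===== SOURCE B (Python) =====
-- from typing import List
--
-- PLAYERS = 2
--
-- def sleight_of_hand(character_list: List[str], number_clicks: int) -> int:
--     # Recursive partition: take the first element, strip ALL of its copies,
--     # decide it by comparing the length drop against the threshold, recurse
--     # on the remainder.  No dict, no counter, no deletion set.
--     limit = number_clicks * PLAYERS
--
--     def go(lst: List[str]) -> int:
--         if not lst: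
--             return 0
--         x = lst[0]
--         rest = [y for y in lst if y != x]
--         keep = 1 if x != '.' and len(lst) - len(rest) <= limit else 0
--         return keep + go(rest)
--
--     return go(character_list)
-- ===== Notes on version B (the rewrite author's own statement) =====
-- stated objective: alternative
-- what changed: A streams the list once maintaining a count dict plus a deleted-char set with mid-loop pruning; B uses no dictionary at all: it recursively partitions the list by its first element, strips all copies of it with a filter, measures that element's multiplicity as the length drop, and recurses on the remainder.
import Mathlib
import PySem

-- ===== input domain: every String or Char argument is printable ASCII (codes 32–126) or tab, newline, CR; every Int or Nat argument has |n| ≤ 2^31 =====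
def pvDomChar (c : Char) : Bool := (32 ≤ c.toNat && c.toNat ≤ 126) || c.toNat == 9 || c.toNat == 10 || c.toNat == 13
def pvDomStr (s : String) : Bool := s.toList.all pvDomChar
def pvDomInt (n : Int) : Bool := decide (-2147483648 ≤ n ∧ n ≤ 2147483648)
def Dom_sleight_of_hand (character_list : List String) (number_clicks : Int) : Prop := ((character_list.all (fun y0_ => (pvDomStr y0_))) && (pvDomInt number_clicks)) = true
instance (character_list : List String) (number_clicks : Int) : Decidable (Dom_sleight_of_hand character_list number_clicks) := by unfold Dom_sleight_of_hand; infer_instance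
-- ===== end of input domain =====

-- B replaces A's one-pass dict-with-deletion-set streaming by a recursive partition that uses no
-- dictionary at all: strip all copies of the first element, read its multiplicity off the length
-- drop, decide it against the threshold, recurse on the remainder. Objective: alternative.

-- ===== PORT A =====
def PLAYERS : Int := 2

-- A's loop body, extracted as a named helper (the state is Python's (del_char, counnt_dict) pair).
def aStep (thr : Int) (st : PySem.Set String × PySem.Dict String Int) (s : String) :
    PySem.Set String × PySem.Dict String Int :=
  if s ≠ "." ∧ s ∉ st.1 then
    let d := st.2.insert s (st.2.getD s 0 + 1)
    if d.getD s 0 > thr then (PySem.Set.add st.1 s, d.erase s) else (st.1, d)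
  else st

-- Python iterates `set(character_list)` in hash order to build the all-zero dict; only the
-- dict's KEY SET (hence its final length) matters for the result, so the port uses
-- PySem.Set.ofList's deterministic first-occurrence order, which has the same key set.
-- `counnt_dict[s] += 1` never raises in A (s is a non-'.', non-deleted element, hence a key);
-- it is ported as insert of getD + 1.
def sleight_of_hand (character_list : List String) (number_clicks : Int) : Int :=
  let counnt_dict : PySem.Dict String Int :=
    (((PySem.Set.ofList character_list).filter (fun x => x ≠ ".")).foldl
      (fun d x => d.insert x 0) PySem.Dict.empty)
  let st := character_list.foldl (aStep (number_clicks * PLAYERS))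
      ((PySem.Set.empty : PySem.Set String), counnt_dict)
  (st.2.size : Int)

-- ===== PORT B =====
-- Source B's inner recursion `go`: partition by the head, filter out all its copies, recurse.
def bGo (limit : Int) : List String → Int
  | [] => 0
  | x :: t =>
    let rest := (x :: t).filter (fun y => y ≠ x)
    (if x ≠ "." ∧ (((x :: t).length : Int) - (rest.length : Int)) ≤ limit then 1 else 0)
      + bGo limit rest
termination_by l => l.length
decreasing_by
  simp only [List.filter_cons, List.length_cons]
  rw [if_neg (by simp)]
  exact Nat.lt_succ_of_le (List.length_filter_le _ _)

def sleight_of_hand_alt (character_list : List String) (number_clicks : Int) : Int :=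
  bGo (number_clicks * PLAYERS) character_list

-- ===== PRECONDITION & SPEC =====
def Spec_sleight_of_hand (character_list : List String) (number_clicks : Int) (out : Int) : Prop := out = sleight_of_hand_alt character_list number_clicks
instance (character_list : List String) (number_clicks : Int) (out : Int) : Decidable (Spec_sleight_of_hand character_list number_clicks out) := by unfold Spec_sleight_of_hand; infer_instance

-- ===== CLAIM (what is proved, stated in full; the proofs are below) =====
def Claim_equal_sleight_of_hand : Prop := ∀ (character_list : List String) (number_clicks : Int), Dom_sleight_of_hand character_list number_clicks → Spec_sleight_of_hand character_list number_clicks (sleight_of_hand character_list number_clicks)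

-- ===== LEMMAS AND PROOFS =====

theorem pv_mem_keys_erase (d : PySem.Dict String Int) (k x : String) :
    x ∈ (d.erase k).keys ↔ x ∈ d.keys ∧ x ≠ k := by
  simp only [PySem.Dict.erase, PySem.Dict.keys, List.mem_map, List.mem_filter]
  constructor
  · rintro ⟨p, ⟨hp, hne⟩, rfl⟩
    exact ⟨⟨p, hp, rfl⟩, by simpa using hne⟩
  · rintro ⟨⟨p, hp, rfl⟩, hne⟩
    exact ⟨p, ⟨hp, by simpa using hne⟩, rfl⟩

theorem pv_nodup_keys_erase (d : PySem.Dict String Int) (k : String)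
    (h : d.keys.Nodup) : (d.erase k).keys.Nodup := by
  simp only [PySem.Dict.erase, PySem.Dict.keys] at *
  exact h.sublist (List.Sublist.map _ List.filter_sublist)

theorem pv_get?_erase_of_ne (d : PySem.Dict String Int) (k x : String) (h : x ≠ k) :
    (d.erase k).get? x = d.get? x := by
  simp only [PySem.Dict.erase, PySem.Dict.get?]
  induction d.items with
  | nil => rfl
  | cons p rest ih =>
    by_cases hp : p.1 = k
    · rw [List.filter_cons_of_neg (by simp [hp]),
          List.find?_cons_of_neg (by simp [hp]; exact fun e => h e.symm), ih]
    · rw [List.filter_cons_of_pos (by simp [hp])]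
      by_cases hx : p.1 = x
      · rw [List.find?_cons_of_pos (by simp [hx]), List.find?_cons_of_pos (by simp [hx])]
      · rw [List.find?_cons_of_neg (by simp [hx]), List.find?_cons_of_neg (by simp [hx]), ih]

theorem pv_getD_erase_of_ne (d : PySem.Dict String Int) (k x : String) (v : Int) (h : x ≠ k) :
    (d.erase k).getD x v = d.getD x v := by
  simp [PySem.Dict.getD, pv_get?_erase_of_ne d k x h]

def pvInv (S : List String) (T : Int) (c : String → Nat)
    (del : PySem.Set String) (d : PySem.Dict String Int) : Prop :=
  d.keys.Nodup ∧
  (∀ x, x ∈ del ↔ x ≠ "." ∧ T < (c x : Int)) ∧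
  (∀ x, (x ∈ d.keys ↔ (x ∈ S ∧ x ≠ "." ∧ (c x : Int) ≤ T))) ∧
  (∀ x, x ∈ d.keys → d.getD x 0 = (c x : Int))

theorem pv_loop_inv (S : List String) (thr : Int) :
    ∀ (t : List String) (c : String → Nat) (del : PySem.Set String)
      (d : PySem.Dict String Int),
      (∀ x ∈ t, x ∈ S) →
      pvInv S (max thr 0) c del d →
      pvInv S (max thr 0) (fun x => c x + t.count x)
        (t.foldl (aStep thr) (del, d)).1 (t.foldl (aStep thr) (del, d)).2 := by
  intro t
  induction t with
  | nil => intro c del d _ hInv; simpa using hInv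
  | cons s t ih =>
    intro c del d ht hInv
    obtain ⟨hnd, hdel, hkey, hval⟩ := hInv
    have hcount : (fun x => c x + (s :: t).count x)
        = (fun x => (c x + (if x = s then 1 else 0)) + t.count x) := by
      funext x
      rcases eq_or_ne x s with rfl | hx
      · simp; omega
      · simp [hx, Ne.symm hx]
    rw [List.foldl_cons, hcount]
    set c₁ : String → Nat := fun x => c x + (if x = s then 1 else 0) with hc₁
    have hT0 : (0 : Int) ≤ max thr 0 := le_max_right _ _
    by_cases h1 : s ≠ "." ∧ s ∉ del
    · obtain ⟨hsne, hsnin⟩ := h1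
      have hcle : (c s : Int) ≤ max thr 0 := by
        by_contra hgt
        exact hsnin ((hdel s).2 ⟨hsne, by omega⟩)
      have hsk : s ∈ d.keys := (hkey s).2 ⟨ht s (by simp), hsne, hcle⟩
      have hvs : d.getD s 0 = (c s : Int) := hval s hsk
      by_cases hgt : (c s : Int) + 1 > thr
      · have hstep : aStep thr (del, d) s
            = (PySem.Set.add del s, (d.insert s (d.getD s 0 + 1)).erase s) := by
          simp only [aStep, if_pos (show s ≠ "." ∧ s ∉ del from ⟨hsne, hsnin⟩)]
          rw [if_pos (by rw [PySem.Dict.getD_insert_self, hvs]; exact hgt)]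
        rw [hstep]
        refine ih c₁ _ _ (fun x hx => ht x (by simp [hx])) ⟨?_, ?_, ?_, ?_⟩
        · exact pv_nodup_keys_erase _ _ (PySem.Dict.nodup_keys_insert _ _ _ hnd)
        · intro x
          rcases eq_or_ne x s with rfl | hxs
          · simp only [PySem.Set.mem_add, hc₁]
            constructor
            · intro _; exact ⟨hsne, by simp; omega⟩
            · intro _; exact Or.inr trivial
          · simp only [PySem.Set.mem_add, hc₁]
            rw [hdel x]
            simp [hxs]
        · intro x
          rw [pv_mem_keys_erase, PySem.Dict.mem_keys_insert]
          rcases eq_or_ne x s with rfl | hxs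
          · simp only [hc₁]
            constructor
            · rintro ⟨-, h⟩; exact absurd rfl h
            · rintro ⟨-, -, hle⟩; exact absurd hle (by simp; omega)
          · rw [hkey x]; simp [hxs, hc₁]
        · intro x hx
          rw [pv_mem_keys_erase] at hx
          obtain ⟨hx1, hxs⟩ := hx
          rw [PySem.Dict.mem_keys_insert] at hx1
          have hx1' : x ∈ d.keys := hx1.resolve_left hxs
          rw [pv_getD_erase_of_ne _ _ _ _ hxs, PySem.Dict.getD_insert_of_ne _ _ _ hxs,
            hval x hx1']
          simp [hc₁, hxs]
      · have hstep : aStep thr (del, d) s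
            = (del, d.insert s (d.getD s 0 + 1)) := by
          simp only [aStep, if_pos (show s ≠ "." ∧ s ∉ del from ⟨hsne, hsnin⟩)]
          rw [if_neg (by rw [PySem.Dict.getD_insert_self, hvs]; exact hgt)]
        rw [hstep]
        have hle1 : (c s : Int) + 1 ≤ max thr 0 := by omega
        refine ih c₁ _ _ (fun x hx => ht x (by simp [hx])) ⟨?_, ?_, ?_, ?_⟩
        · exact PySem.Dict.nodup_keys_insert _ _ _ hnd
        · intro x
          rcases eq_or_ne x s with rfl | hxs
          · simp only [hc₁]
            constructor
            · intro hx; exact absurd hx hsnin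
            · rintro ⟨-, hlt⟩; simp at hlt; omega
          · rw [hdel x]; simp [hxs, hc₁]
        · intro x
          rw [PySem.Dict.mem_keys_insert]
          rcases eq_or_ne x s with rfl | hxs
          · simp only [hc₁]
            constructor
            · intro _; exact ⟨ht x (by simp), hsne, by simp; omega⟩
            · intro _; exact Or.inl trivial
          · rw [hkey x]; simp [hxs, hc₁]
        · intro x hx
          rcases eq_or_ne x s with rfl | hxs
          · rw [PySem.Dict.getD_insert_self, hvs]; simp [hc₁]
          · rw [PySem.Dict.getD_insert_of_ne _ _ _ hxs,
              hval x ((PySem.Dict.mem_keys_insert _ _ _ _).1 hx |>.resolve_left hxs)]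
            simp [hc₁, hxs]
    · have hstep : aStep thr (del, d) s = (del, d) := by
        simp only [aStep, if_neg h1]
      rw [hstep]
      have hs : s = "." ∨ s ∈ del := by
        by_cases hse : s = "."
        · exact Or.inl hse
        · exact Or.inr (by_contra fun hn => h1 ⟨hse, hn⟩)
      refine ih c₁ _ _ (fun x hx => ht x (by simp [hx])) ⟨hnd, ?_, ?_, ?_⟩
      · intro x
        rcases eq_or_ne x s with rfl | hxs
        · rcases hs with hse | hsdel
          · rw [hdel x]
            simp only [hc₁]
            constructor
            · rintro ⟨hne, hlt⟩; exact ⟨hne, by omega⟩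
            · rintro ⟨hne, -⟩; exact absurd hse hne
          · have hd := (hdel x).1 hsdel
            constructor
            · intro _; exact ⟨hd.1, by have := hd.2; simp only [hc₁]; push_cast; omega⟩
            · intro _; exact hsdel
        · rw [hdel x]; simp [hxs, hc₁]
      · intro x
        rcases eq_or_ne x s with rfl | hxs
        · rcases hs with hse | hsdel
          · rw [hkey x]
            constructor
            · rintro ⟨-, hne, -⟩; exact absurd hse hne
            · rintro ⟨-, hne, -⟩; exact absurd hse hne
          · have hd := (hdel x).1 hsdel
            rw [hkey x]
            constructor
            · rintro ⟨-, -, hle⟩; exact absurd hle (by have := hd.2; omega)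
            · rintro ⟨-, -, hle⟩
              exact absurd hle (by have := hd.2; simp only [hc₁]; push_cast; simp; omega)
        · rw [hkey x]; simp [hxs, hc₁]
      · intro x hx
        have hxne : x ≠ "." := ((hkey x).1 hx).2.1
        have hxle : (c x : Int) ≤ max thr 0 := ((hkey x).1 hx).2.2
        rcases eq_or_ne x s with rfl | hxs
        · rcases hs with hse | hsdel
          · exact absurd hse hxne
          · exact absurd ((hdel x).1 hsdel).2 (by omega)
        · rw [hval x hx]; simp [hc₁, hxs]

-- Removing all copies of x from t drops exactly (t.count x) elements.
theorem pv_length_filter_ne (x : String) (t : List String) :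
    (t.filter (fun y => y ≠ x)).length + t.count x = t.length := by
  induction t with
  | nil => simp
  | cons a t ih =>
    by_cases h : a = x
    · subst h
      rw [List.filter_cons_of_neg (by simp)]
      simp only [List.count_cons_self, List.length_cons]
      omega
    · rw [List.filter_cons_of_pos (by simp [h])]
      simp only [List.count_cons, beq_iff_eq, List.length_cons]
      rw [if_neg h]
      omega

-- Filtering away x does not change the count of any other element.
theorem pv_count_filter_ne (x y : String) (t : List String) (h : y ≠ x) :
    (t.filter (fun z => z ≠ x)).count y = t.count y :=
  List.count_filter (by simp [h])

-- unfolding equations for bGo (well-founded definition)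
theorem pv_bGo_nil (limit : Int) : bGo limit [] = 0 := by rw [bGo.eq_def]

theorem pv_bGo_cons (limit : Int) (x : String) (t : List String) : bGo limit (x :: t) =
    (if x ≠ "." ∧ (((x :: t).length : Int)
        - (((x :: t).filter (fun y => y ≠ x)).length : Int)) ≤ limit then 1 else 0)
      + bGo limit ((x :: t).filter (fun y => y ≠ x)) := by rw [bGo.eq_def]

-- bGo counts the distinct non-'.' elements whose multiplicity is within the threshold.
theorem pv_bGo_eq (limit : Int) : ∀ (n : Nat) (l : List String), l.length ≤ n →
    bGo limit l
      = (((PySem.Set.ofList l).countP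
          (fun x => decide (x ≠ "." ∧ (l.count x : Int) ≤ limit))) : Int) := by
  intro n
  induction n with
  | zero =>
    intro l hl
    have : l = [] := List.eq_nil_of_length_eq_zero (Nat.le_zero.1 hl)
    subst this
    rw [pv_bGo_nil]
    simp [PySem.Set.ofList]
  | succ n ih =>
    intro l hl
    cases l with
    | nil =>
      rw [pv_bGo_nil]
      simp [PySem.Set.ofList]
    | cons x t =>
      have hrest : (x :: t).filter (fun y => y ≠ x) = t.filter (fun y => y ≠ x) := by
        rw [List.filter_cons_of_neg (by simp)]
      rw [pv_bGo_cons]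
      simp only [hrest]
      set rest := t.filter (fun y => y ≠ x) with hrestdef
      have hlen : rest.length + t.count x = t.length := pv_length_filter_ne x t
      have hlenle : rest.length ≤ n := by
        have := Nat.succ_le_succ_iff.1 hl
        omega
      have hcx : (((x :: t).length : Int) - (rest.length : Int)) = ((x :: t).count x : Int) := by
        simp only [List.length_cons, List.count_cons_self]
        push_cast
        omega
      -- the two distinct-element lists are a permutation of each other
      have hxnotin : x ∉ PySem.Set.ofList rest := by
        intro hx
        have := (PySem.Set.mem_ofList rest x).1 hx
        rw [hrestdef, List.mem_filter] at this
        simp at this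
      have hperm : (PySem.Set.ofList (x :: t)).Perm (x :: PySem.Set.ofList rest) := by
        rw [List.perm_ext_iff_of_nodup (PySem.Set.nodup_ofList _)
          ((PySem.Set.nodup_ofList rest).cons hxnotin)]
        intro a
        rw [PySem.Set.mem_ofList, List.mem_cons, List.mem_cons, PySem.Set.mem_ofList,
          hrestdef, List.mem_filter]
        by_cases ha : a = x
        · subst ha; simp
        · simp [ha]
      rw [hperm.countP_eq, List.countP_cons]
      have hcongr : (PySem.Set.ofList rest).countP
            (fun y => decide (y ≠ "." ∧ ((x :: t).count y : Int) ≤ limit))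
          = (PySem.Set.ofList rest).countP
            (fun y => decide (y ≠ "." ∧ (rest.count y : Int) ≤ limit)) := by
        apply List.countP_congr
        intro y hy
        have hyx : y ≠ x := by
          intro h; exact hxnotin (h ▸ hy)
        have h1 : List.count y (x :: t) = List.count y t := by
          simp [Ne.symm hyx]
        rw [h1, hrestdef, pv_count_filter_ne x y t hyx]
      rw [hcongr, ih rest hlenle, hcx]
      by_cases hx : x ≠ "." ∧ ((List.count x (x :: t) : Int)) ≤ limit
      · rw [if_pos hx, if_pos (by simpa using hx)]
        push_cast
        ring
      · rw [if_neg hx, if_neg (by simpa using hx)]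
        push_cast
        ring

theorem pv_main (l : List String) (k : Int) :
    sleight_of_hand l k = sleight_of_hand_alt l k := by
  unfold sleight_of_hand
  simp only []
  have hd0items :
      ((((PySem.Set.ofList l).filter (fun x => x ≠ ".")).foldl
        (fun d x => d.insert x 0) PySem.Dict.empty) : PySem.Dict String Int).items
      = ((PySem.Set.ofList l).filter (fun x => x ≠ ".")).map (fun x => (x, (0 : Int))) := by
    have := PySem.Dict.items_foldl_insert_fresh
      (l := (PySem.Set.ofList l).filter (fun x => x ≠ "."))
      (k := fun a => a) (v := fun _ => (0 : Int)) (d := PySem.Dict.empty)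
      (by intro a _; exact PySem.Dict.contains_empty a)
      (by simpa using ((PySem.Set.nodup_ofList l).filter _))
    simpa using this
  have hd0keys :
      ((((PySem.Set.ofList l).filter (fun x => x ≠ ".")).foldl
        (fun d x => d.insert x 0) PySem.Dict.empty) : PySem.Dict String Int).keys
      = (PySem.Set.ofList l).filter (fun x => x ≠ ".") := by
    simp only [PySem.Dict.keys, hd0items, List.map_map]
    simp [Function.comp_def]
  have hInv0 : pvInv (PySem.Set.ofList l) (max (k * PLAYERS) 0) (fun _ => 0)
      (PySem.Set.empty : PySem.Set String)
      (((PySem.Set.ofList l).filter (fun x => x ≠ ".")).foldl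
        (fun d x => d.insert x 0) PySem.Dict.empty) := by
    refine ⟨?_, ?_, ?_, ?_⟩
    · rw [hd0keys]; exact (PySem.Set.nodup_ofList l).filter _
    · intro x
      simp [PySem.Set.empty]
    · intro x
      rw [hd0keys, List.mem_filter]
      simp
    · intro x hx
      rw [hd0keys, List.mem_filter] at hx
      apply PySem.Dict.getD_of_mem_items
      · rw [hd0items, List.mem_map]
        exact ⟨x, by rw [List.mem_filter]; exact hx, rfl⟩
      · rw [hd0keys]; exact (PySem.Set.nodup_ofList l).filter _
  have hInvF := pv_loop_inv (PySem.Set.ofList l) (k * PLAYERS) l (fun _ => 0)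
    (PySem.Set.empty : PySem.Set String) _
    (fun x hx => (PySem.Set.mem_ofList l x).2 hx) hInv0
  obtain ⟨hndF, -, hkeyF, -⟩ := hInvF
  have hperm :
      (l.foldl (aStep (k * PLAYERS))
        ((PySem.Set.empty : PySem.Set String),
          ((PySem.Set.ofList l).filter (fun x => x ≠ ".")).foldl
            (fun d x => d.insert x 0) PySem.Dict.empty)).2.keys.Perm
      ((PySem.Set.ofList l).filter
        (fun x => decide (x ≠ "." ∧ (l.count x : Int) ≤ max (k * PLAYERS) 0))) := by
    rw [List.perm_ext_iff_of_nodup hndF ((PySem.Set.nodup_ofList l).filter _)]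
    intro a
    rw [hkeyF a, List.mem_filter]
    simp
  have hA : (l.foldl (aStep (k * PLAYERS))
        ((PySem.Set.empty : PySem.Set String),
          ((PySem.Set.ofList l).filter (fun x => x ≠ ".")).foldl
            (fun d x => d.insert x 0) PySem.Dict.empty)).2.size
      = ((PySem.Set.ofList l).filter
          (fun x => decide (x ≠ "." ∧ (l.count x : Int) ≤ max (k * PLAYERS) 0))).length := by
    rw [← hperm.length_eq]
    simp [PySem.Dict.size, PySem.Dict.keys]
  have hcongr : ((PySem.Set.ofList l).filter
          (fun x => decide (x ≠ "." ∧ (l.count x : Int) ≤ max (k * PLAYERS) 0))).length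
      = (PySem.Set.ofList l).countP
          (fun x => decide (x ≠ "." ∧ (l.count x : Int) ≤ k * PLAYERS)) := by
    rw [← List.countP_eq_length_filter]
    apply List.countP_congr
    intro x hx
    have hc : 0 < l.count x := List.count_pos_iff.2 ((PySem.Set.mem_ofList l x).1 hx)
    simp only [decide_eq_true_eq]
    constructor <;> rintro ⟨h1, h2⟩ <;> exact ⟨h1, by omega⟩
  have hB : sleight_of_hand_alt l k
      = (((PySem.Set.ofList l).countP
          (fun x => decide (x ≠ "." ∧ (l.count x : Int) ≤ k * PLAYERS))) : Int) := by
    unfold sleight_of_hand_alt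
    exact pv_bGo_eq (k * PLAYERS) l.length l le_rfl
  rw [hB, hA, hcongr]

-- ===== VERDICT (by name: the statement is the Claim_ definition above) =====
theorem sleight_of_hand_spec : Claim_equal_sleight_of_hand := by
  intro character_list number_clicks _
  unfold Spec_sleight_of_hand
  exact pv_main character_list number_clicks
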